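-- pv_equiv track=rewrite | github.com/pypi-data/pypi-mirror-39 | packages/multilevel-panels/multilevel_panels-0.1-py3-none-any.whl/multilevel_panels/multilevel_panels.py | hasgaps
-- ===== SOURCE A (Python) =====
-- from typing import List, Sequence, Tuple
--
-- def get_gap_patterns(n: int) -> Tuple:
--     """Return a tuple of integers whose binary representation is like the following regular expression: ^10{m}1$
--     and m = n - 2.
--     """
--     if n < 3:
--         return tuple()
--     else:
--         return get_gap_patterns(n - 1) + ((1 << (n - 1)) + 1, )
--
-- def hasgaps(bool_lst: List) -> bool:
--     """Determine if the passed list of boolean values matches any possible gap pattern for a list of such length.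
--     """
--     # assume the input represents a bit array and convert it to an integer
--     val = int(sum(v << i for i, v in enumerate(reversed(bool_lst))))
--
--     gap_patterns = get_gap_patterns(val.bit_length())
--
--     while val:
--         for i, n in enumerate(range(3, val.bit_length() + 1)):
--             # if the value's lower bits matches the gap pattern of corresponding length
--             if (val & ((2 ** n) - 1)) ^ gap_patterns[i] == 0:
--                 return True
--         else:
--             val = val >> 1
--
--     return False
-- ===== SOURCE B (Python) =====
-- def hasgaps(bool_lst):
--     seen_one = False
--     gap = False
--     for v in bool_lst:
--         if v:
--             if gap:
--                 return True
--             seen_one = True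
--         elif seen_one:
--             gap = True
--     return False
-- ===== Notes on version B (the rewrite author's own statement) =====
-- stated objective: faster
-- what changed: B replaces A's conversion of the list to an integer plus repeated shift-and-XOR matching against a recursively built tuple of gap bit-patterns by a single linear scan that detects a False lying between two Trues.
import Mathlib
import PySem

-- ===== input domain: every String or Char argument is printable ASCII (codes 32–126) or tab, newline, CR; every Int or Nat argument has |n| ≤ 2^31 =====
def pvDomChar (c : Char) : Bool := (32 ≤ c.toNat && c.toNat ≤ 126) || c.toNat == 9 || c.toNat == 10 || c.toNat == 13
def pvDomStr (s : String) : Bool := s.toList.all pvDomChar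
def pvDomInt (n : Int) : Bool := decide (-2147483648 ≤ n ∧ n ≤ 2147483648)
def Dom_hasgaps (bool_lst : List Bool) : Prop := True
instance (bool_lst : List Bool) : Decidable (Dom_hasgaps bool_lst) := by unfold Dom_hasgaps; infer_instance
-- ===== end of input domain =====

-- B replaces A's quadratic shift-and-match against generated bit patterns by one
-- linear scan for a False lying between two Trues (objective: faster).

-- ===== PORT A =====

-- get_gap_patterns(n): tuple of ints of binary shape 1 0^(n-2) 1, for lengths 3..n
def getGapPatterns (n : Nat) : List Nat :=
  if n < 3 then [] else getGapPatterns (n - 1) ++ [(1 <<< (n - 1)) + 1]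

-- val = int(sum(v << i for i, v in enumerate(reversed(bool_lst)))); the enumerate
-- indices are the nonnegative 0,1,2,…, so .toNat on them is exact
def pvVal (bool_lst : List Bool) : Nat :=
  (PySem.List.enumerate bool_lst.reverse).foldl
    (fun acc p => acc + ((if p.2 then 1 else 0) <<< p.1.toNat)) 0

-- the inner `for i, n in enumerate(range(3, val.bit_length() + 1))` with its
-- early `return True`; gap_patterns[i] is always in range on reachable states,
-- so `getD … 0` returns exactly the tuple element Python reads
def pvCheck (pat : List Nat) (val : Nat) : Bool :=
  (List.range (val.size + 1 - 3)).any fun i =>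
    ((val &&& (2 ^ (i + 3) - 1)) ^^^ pat.getD i 0) == 0

-- the `while val:` loop; `val.bit_length()` of a nonnegative int is Nat.size
def hasgapsLoop (pat : List Nat) (val : Nat) : Bool :=
  if val = 0 then false
  else if pvCheck pat val then true
  else hasgapsLoop pat (val >>> 1)
termination_by val
decreasing_by
  have h2 : val >>> 1 = val / 2 := Nat.shiftRight_one val
  omega

def hasgaps (bool_lst : List Bool) : Bool :=
  hasgapsLoop (getGapPatterns (pvVal bool_lst).size) (pvVal bool_lst)

-- ===== PORT B =====

-- the scan loop of Source B, state (seen_one, gap), early `return True` on a True after a gap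
def scanGaps : List Bool → Bool → Bool → Bool
  | [], _, _ => false
  | v :: rest, seen_one, gap =>
    if v then
      if gap then true else scanGaps rest true gap
    else
      scanGaps rest seen_one (seen_one || gap)

def hasgaps_alt (bool_lst : List Bool) : Bool := scanGaps bool_lst false false

-- ===== PRECONDITION & SPEC =====
def Spec_hasgaps (bool_lst : List Bool) (out : Bool) : Prop := out = hasgaps_alt bool_lst
instance (bool_lst : List Bool) (out : Bool) : Decidable (Spec_hasgaps bool_lst out) := by unfold Spec_hasgaps; infer_instance

-- ===== CLAIM (what is proved, stated in full; the proofs are below) =====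
def Claim_equal_hasgaps : Prop := ∀ (bool_lst : List Bool), Dom_hasgaps bool_lst → Spec_hasgaps bool_lst (hasgaps bool_lst)

-- ===== LEMMAS AND PROOFS =====

-- LSB-first value of a bit list
def natOf : List Bool → Nat
  | [] => 0
  | b :: t => (if b then 1 else 0) + 2 * natOf t

theorem foldl_enumerate_natOf (R : List Bool) : ∀ (s a : Nat),
    (PySem.List.enumerate R (s : Int)).foldl
      (fun acc p => acc + ((if p.2 then 1 else 0) <<< p.1.toNat)) a
      = a + 2 ^ s * natOf R := by
  induction R with
  | nil => intro s a; simp [PySem.List.enumerate_nil, natOf]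
  | cons b t ih =>
    intro s a
    have hcast : ((s : Int) + 1) = ((s + 1 : Nat) : Int) := by push_cast; ring
    rw [PySem.List.enumerate_cons, List.foldl_cons, hcast, ih (s + 1)]
    have : ((s : Int)).toNat = s := Int.toNat_natCast s
    simp only [this, natOf, Nat.shiftLeft_eq, pow_succ]
    cases b <;> simp <;> ring

theorem pvVal_eq (l : List Bool) : pvVal l = natOf l.reverse := by
  have := foldl_enumerate_natOf l.reverse 0 0
  simpa [pvVal, PySem.List.enumerate] using this

theorem natOf_div_two (b : Bool) (t : List Bool) : natOf (b :: t) / 2 = natOf t := by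
  simp only [natOf]; cases b <;> simp <;> omega

theorem testBit_natOf (R : List Bool) : ∀ i, (natOf R).testBit i = R.getD i false := by
  induction R with
  | nil => intro i; simp [natOf]
  | cons b t ih =>
    intro i
    cases i with
    | zero =>
      simp only [Nat.testBit_zero, natOf, List.getD_cons_zero]
      cases b <;> simp <;> omega
    | succ i =>
      rw [Nat.testBit_add_one, natOf_div_two, ih, List.getD_cons_succ]

-- the index-existential form of "contains True … False … True"
def P3 (l : List Bool) : Prop :=
  ∃ i j k, i < j ∧ j < k ∧ l.getD i false = true ∧ l.getD j false = false ∧ l.getD k false = true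

def P2 (l : List Bool) : Prop :=
  ∃ j k, j < k ∧ l.getD j false = false ∧ l.getD k false = true

def P1 (l : List Bool) : Prop := ∃ k, l.getD k false = true

-- Nat-side predicate matching hasgapsLoop
def TFTn (v : Nat) : Prop :=
  ∃ i j k, i < j ∧ j < k ∧ v.testBit i = true ∧ v.testBit j = false ∧ v.testBit k = true

theorem TFTn_natOf (R : List Bool) : TFTn (natOf R) ↔ P3 R := by
  unfold TFTn P3
  simp only [testBit_natOf]

theorem getGapPatterns_eq (n : Nat) :
    getGapPatterns n = (List.range (n - 2)).map (fun i => 2 ^ (i + 2) + 1) := by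
  induction n using Nat.strong_induction_on with
  | _ n ih =>
    rw [getGapPatterns]
    by_cases h : n < 3
    · have : n - 2 = 0 := by omega
      simp [h, this]
    · have h1 : n - 1 < n := by omega
      rw [if_neg h, ih (n - 1) h1]
      have h2 : n - 2 = (n - 3) + 1 := by omega
      have h3 : n - 1 - 2 = n - 3 := by omega
      rw [h2, h3, List.range_succ, List.map_append]
      have h4 : (1 : Nat) <<< (n - 1) = 2 ^ (n - 3 + 2) := by
        rw [Nat.shiftLeft_eq, one_mul]
        congr 1
        omega
      simp [h4]

-- the inner-loop condition as a mod equation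
def Cv (v : Nat) : Prop := ∃ n, 3 ≤ n ∧ n ≤ v.size ∧ v % 2 ^ n = 2 ^ (n - 1) + 1

theorem testBit_two_pow_add_one {k m : Nat} (hk : 1 ≤ k) :
    (2 ^ k + 1).testBit m = (decide (m = k) || decide (m = 0)) := by
  cases m with
  | zero =>
    have : (2 ^ k + 1) % 2 = 1 := by
      have : 2 ^ k % 2 = 0 := by
        have : (2 : Nat) ∣ 2 ^ k := dvd_pow_self 2 (by omega)
        omega
      omega
    simp [Nat.testBit_zero, this]
  | succ m =>
    have hdiv : (2 ^ k + 1) / 2 = 2 ^ (k - 1) := by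
      have : 2 ^ k = 2 * 2 ^ (k - 1) := by
        conv_lhs => rw [show k = 1 + (k - 1) by omega]
        rw [pow_add, pow_one]
      omega
    rw [Nat.testBit_add_one, hdiv, Nat.testBit_two_pow]
    have : (k - 1 = m) ↔ (m + 1 = k) := by omega
    simp [this]

theorem mod_pattern_iff {v n : Nat} (hn : 3 ≤ n) :
    v % 2 ^ n = 2 ^ (n - 1) + 1 ↔
      (v.testBit 0 = true ∧ (∀ m, 1 ≤ m → m ≤ n - 2 → v.testBit m = false) ∧
        v.testBit (n - 1) = true) := by
  have hb : ∀ m, (2 ^ (n - 1) + 1).testBit m = (decide (m = n - 1) || decide (m = 0)) :=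
    fun m => testBit_two_pow_add_one (by omega)
  constructor
  · intro h
    have key : ∀ m, m < n → v.testBit m = (decide (m = n - 1) || decide (m = 0)) := by
      intro m hm
      have := Nat.testBit_mod_two_pow v n m
      rw [h, hb m] at this
      simpa [hm] using this.symm
    refine ⟨by simpa using key 0 (by omega), fun m h1 h2 => ?_, ?_⟩
    · have := key m (by omega)
      rw [this]
      simp only [Bool.or_eq_false_iff, decide_eq_false_iff_not]
      omega
    · have := key (n - 1) (by omega)
      rw [this]
      simp
  · rintro ⟨h0, hmid, htop⟩
    apply Nat.eq_of_testBit_eq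
    intro m
    rw [Nat.testBit_mod_two_pow, hb m]
    by_cases hm : m < n
    · simp only [hm, decide_true, Bool.true_and]
      rcases Nat.eq_zero_or_pos m with rfl | hpos
      · simp [h0]
      · by_cases hm1 : m = n - 1
        · subst hm1; simp [htop]
        · rw [hmid m hpos (by omega)]
          have h1 : ¬(m = n - 1) := hm1
          have h2 : ¬(m = 0) := by omega
          simp [h1, h2]
    · simp only [hm, decide_false, Bool.false_and]
      have h1 : ¬(m = n - 1) := by omega
      have h2 : ¬(m = 0) := by omega
      simp [h1, h2]

theorem pvCheck_iff {pat : List Nat} {v : Nat}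
    (hpat : ∀ i, i < pat.length → pat.getD i 0 = 2 ^ (i + 2) + 1)
    (hlen : v.size ≤ pat.length + 2) :
    pvCheck pat v = true ↔ Cv v := by
  unfold pvCheck Cv
  rw [List.any_eq_true]
  constructor
  · rintro ⟨i, hi, hcond⟩
    rw [List.mem_range] at hi
    refine ⟨i + 3, by omega, by omega, ?_⟩
    have hip : i < pat.length := by omega
    rw [hpat i hip] at hcond
    rw [beq_iff_eq, Nat.xor_eq_zero_iff, Nat.and_two_pow_sub_one_eq_mod] at hcond
    have he : i + 3 - 1 = i + 2 := by omega
    rw [he]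
    exact hcond
  · rintro ⟨n, hn3, hns, hmod⟩
    refine ⟨n - 3, List.mem_range.mpr (by omega), ?_⟩
    have hip : n - 3 < pat.length := by omega
    rw [hpat (n - 3) hip]
    have h1 : n - 3 + 3 = n := by omega
    have h2 : n - 3 + 2 = n - 1 := by omega
    rw [h1, h2, Nat.and_two_pow_sub_one_eq_mod]
    simp [hmod]

theorem TFTn_step (v : Nat) : TFTn v ↔ Cv v ∨ TFTn (v >>> 1) := by
  constructor
  · rintro ⟨i, j, k, hij, hjk, bi, bj, bk⟩
    rcases Nat.eq_zero_or_pos i with rfl | hi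
    · by_cases hb1 : v.testBit 1 = true
      · -- shift: witnesses (1, j, k) move to (0, j-1, k-1)
        right
        have hj1 : j ≠ 1 := fun h => by rw [h] at bj; rw [bj] at hb1; exact Bool.false_ne_true hb1
        refine ⟨0, j - 1, k - 1, by omega, by omega, ?_, ?_, ?_⟩ <;>
          rw [Nat.testBit_shiftRight]
        · simpa [show 1 + 0 = 1 by omega] using hb1
        · rw [show 1 + (j - 1) = j by omega]; exact bj
        · rw [show 1 + (k - 1) = k by omega]; exact bk
      · -- bit 1 is zero: the flush pattern matches, Cv holds
        left
        have hk2 : 2 ≤ k := by omega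
        have hex : ∃ m, 2 ≤ m ∧ v.testBit m = true := ⟨k, hk2, bk⟩
        classical
        let K := Nat.find hex
        have hK := Nat.find_spec hex
        have hKmin := fun m (hm : m < K) => Nat.find_min hex hm
        refine ⟨K + 1, by omega, ?_, ?_⟩
        · have h2p : 2 ^ K ≤ v := Nat.ge_two_pow_of_testBit hK.2
          have := Nat.lt_size.mpr h2p
          omega
        · rw [mod_pattern_iff (by omega)]
          refine ⟨bi, fun m h1 h2 => ?_, by simpa using hK.2⟩
          rcases Nat.lt_or_ge m 2 with hm2 | hm2
          · have : m = 1 := by omega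
            subst this
            exact Bool.not_eq_true _ ▸ (by simpa using hb1)
          · have hmK : m < K := by omega
            have := hKmin m hmK
            simp only [not_and] at this
            simpa using Bool.not_eq_true _ ▸ (this hm2)
    · right
      refine ⟨i - 1, j - 1, k - 1, by omega, by omega, ?_, ?_, ?_⟩ <;>
        rw [Nat.testBit_shiftRight]
      · rw [show 1 + (i - 1) = i by omega]; exact bi
      · rw [show 1 + (j - 1) = j by omega]; exact bj
      · rw [show 1 + (k - 1) = k by omega]; exact bk
  · rintro (⟨n, hn3, _, hmod⟩ | ⟨i, j, k, hij, hjk, bi, bj, bk⟩)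
    · rw [mod_pattern_iff hn3] at hmod
      exact ⟨0, 1, n - 1, by omega, by omega, hmod.1, hmod.2.1 1 (by omega) (by omega), hmod.2.2⟩
    · rw [Nat.testBit_shiftRight] at bi bj bk
      exact ⟨1 + i, 1 + j, 1 + k, by omega, by omega, bi, bj, bk⟩

theorem TFTn_zero : ¬ TFTn 0 := by
  rintro ⟨i, j, k, _, _, bi, _, _⟩
  simp [Nat.zero_testBit] at bi

theorem hasgapsLoop_iff (pat : List Nat)
    (hpat : ∀ i, i < pat.length → pat.getD i 0 = 2 ^ (i + 2) + 1) :
    ∀ v, v.size ≤ pat.length + 2 → (hasgapsLoop pat v = true ↔ TFTn v) := by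
  intro v
  induction v using Nat.strong_induction_on with
  | _ v ih =>
    intro hlen
    rw [hasgapsLoop]
    by_cases h0 : v = 0
    · subst h0
      simp only [if_pos rfl]
      exact ⟨fun h => absurd h (Bool.false_ne_true), fun h => absurd h TFTn_zero⟩
    · rw [if_neg h0]
      have hstep := TFTn_step v
      have hchk := pvCheck_iff hpat hlen
      by_cases hc : pvCheck pat v = true
      · simp only [hc, if_pos rfl]
        exact ⟨fun _ => hstep.mpr (Or.inl (hchk.mp hc)), fun _ => rfl⟩
      · rw [if_neg hc]
        have hlt : v >>> 1 < v := by
          have : v >>> 1 = v / 2 := Nat.shiftRight_one v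
          omega
        have hsz : (v >>> 1).size ≤ pat.length + 2 := by
          have hle : v >>> 1 ≤ v := le_of_lt hlt
          exact le_trans (Nat.size_le_size hle) hlen
        rw [ih (v >>> 1) hlt hsz, hstep]
        have hncv : ¬ Cv v := fun hcv => hc (hchk.mpr hcv)
        tauto

-- index existentials ↔ sublists
theorem P1_iff (l : List Bool) : P1 l ↔ List.Sublist [true] l := by
  rw [List.singleton_sublist]
  unfold P1
  constructor
  · rintro ⟨k, hk⟩
    have hklen : k < l.length := by
      by_contra h
      rw [List.getD_eq_default _ _ (by omega)] at hk
      exact Bool.false_ne_true hk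
    rw [List.getD_eq_getElem _ _ hklen] at hk
    exact hk ▸ List.getElem_mem hklen
  · intro h
    obtain ⟨k, hklen, hk⟩ := List.getElem_of_mem h
    exact ⟨k, by rw [List.getD_eq_getElem _ _ hklen]; exact hk⟩

theorem P2_cons (b : Bool) (t : List Bool) :
    P2 (b :: t) ↔ (b = false ∧ P1 t) ∨ P2 t := by
  unfold P2 P1
  constructor
  · rintro ⟨j, k, hjk, hj, hk⟩
    cases j with
    | zero =>
      left
      rw [List.getD_cons_zero] at hj
      refine ⟨hj, k - 1, ?_⟩
      rw [show k = (k - 1) + 1 by omega, List.getD_cons_succ] at hk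
      exact hk
    | succ j =>
      right
      rw [List.getD_cons_succ] at hj
      rw [show k = (k - 1) + 1 by omega, List.getD_cons_succ] at hk
      exact ⟨j, k - 1, by omega, hj, hk⟩
  · rintro (⟨hb, k, hk⟩ | ⟨j, k, hjk, hj, hk⟩)
    · exact ⟨0, k + 1, by omega, by simpa using hb, by simpa using hk⟩
    · exact ⟨j + 1, k + 1, by omega, by simpa using hj, by simpa using hk⟩

theorem P3_cons (b : Bool) (t : List Bool) :
    P3 (b :: t) ↔ (b = true ∧ P2 t) ∨ P3 t := by
  unfold P3 P2
  constructor
  · rintro ⟨i, j, k, hij, hjk, hi, hj, hk⟩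
    cases i with
    | zero =>
      left
      rw [List.getD_cons_zero] at hi
      rw [show j = (j - 1) + 1 by omega, List.getD_cons_succ] at hj
      rw [show k = (k - 1) + 1 by omega, List.getD_cons_succ] at hk
      exact ⟨hi, j - 1, k - 1, by omega, hj, hk⟩
    | succ i =>
      right
      rw [List.getD_cons_succ] at hi
      rw [show j = (j - 1) + 1 by omega, List.getD_cons_succ] at hj
      rw [show k = (k - 1) + 1 by omega, List.getD_cons_succ] at hk
      exact ⟨i, j - 1, k - 1, by omega, by omega, hi, hj, hk⟩
  · rintro (⟨hb, j, k, hjk, hj, hk⟩ | ⟨i, j, k, hij, hjk, hi, hj, hk⟩)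
    · exact ⟨0, j + 1, k + 1, by omega, by omega, by simpa using hb, by simpa using hj,
        by simpa using hk⟩
    · exact ⟨i + 1, j + 1, k + 1, by omega, by omega, by simpa using hi, by simpa using hj,
        by simpa using hk⟩

theorem P2_iff (l : List Bool) : P2 l ↔ List.Sublist [false, true] l := by
  induction l with
  | nil =>
    simp only [List.sublist_nil]
    unfold P2
    constructor
    · rintro ⟨j, k, _, _, hk⟩
      simp [List.getD] at hk
    · intro h; simp at h
  | cons b t ih =>
    rw [P2_cons, List.cons_sublist_cons', ih, P1_iff]
    constructor
    · rintro (⟨hb, h⟩ | h)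
      · exact Or.inr ⟨hb.symm, h⟩
      · exact Or.inl h
    · rintro (h | ⟨hb, h⟩)
      · exact Or.inr h
      · exact Or.inl ⟨hb.symm, h⟩

theorem P3_iff (l : List Bool) : P3 l ↔ List.Sublist [true, false, true] l := by
  induction l with
  | nil =>
    simp only [List.sublist_nil]
    unfold P3
    constructor
    · rintro ⟨i, j, k, _, _, hi, _, _⟩
      simp [List.getD] at hi
    · intro h; simp at h
  | cons b t ih =>
    rw [P3_cons, List.cons_sublist_cons', ih, P2_iff]
    constructor
    · rintro (⟨hb, h⟩ | h)
      · exact Or.inr ⟨hb.symm, h⟩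
      · exact Or.inl h
    · rintro (h | ⟨hb, h⟩)
      · exact Or.inr h
      · exact Or.inl ⟨hb.symm, h⟩

theorem scanGaps_iff (l : List Bool) : ∀ (s g : Bool),
    scanGaps l s g = true ↔
      (List.Sublist [true, false, true] l) ∨ (g = true ∧ List.Sublist [true] l) ∨
        (s = true ∧ List.Sublist [false, true] l) := by
  induction l with
  | nil =>
    intro s g
    simp [scanGaps]
  | cons b t ih =>
    intro s g
    have e3 : List.Sublist [true, false, true] (b :: t) ↔
        List.Sublist [true, false, true] t ∨ true = b ∧ List.Sublist [false, true] t :=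
      List.cons_sublist_cons'
    have e2 : List.Sublist [false, true] (b :: t) ↔
        List.Sublist [false, true] t ∨ false = b ∧ List.Sublist [true] t :=
      List.cons_sublist_cons'
    have e1 : List.Sublist [true] (b :: t) ↔
        List.Sublist [true] t ∨ true = b ∧ List.Sublist [] t :=
      List.cons_sublist_cons'
    cases b
    · have hstep : scanGaps (false :: t) s g = scanGaps t s (s || g) := rfl
      rw [hstep, ih, e3, e2, e1]
      clear ih hstep e3 e2 e1
      cases s <;> cases g <;>
        simp only [Bool.or_self, Bool.or_false, Bool.or_true, Bool.true_or,
          Bool.false_eq_true, Bool.true_eq_false, false_and, true_and, false_or, or_false,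
          eq_self_iff_true] <;> tauto
    · cases g
      · have hstep : scanGaps (true :: t) s false = scanGaps t true false := rfl
        rw [hstep, ih, e3, e2, e1]
        clear ih hstep e3 e2 e1
        cases s <;>
          simp only [Bool.or_self, Bool.or_false, Bool.or_true, Bool.true_or,
            Bool.false_eq_true, Bool.true_eq_false, false_and, true_and, false_or, or_false,
            eq_self_iff_true] <;> tauto
      · have hstep : scanGaps (true :: t) s true = true := rfl
        rw [hstep, e3, e2, e1]
        simp [List.nil_sublist]

theorem hasgaps_eq_iff (l : List Bool) : hasgaps l = true ↔ List.Sublist [true, false, true] l := by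
  unfold hasgaps
  set v := pvVal l with hv
  have hpat : ∀ i, i < (getGapPatterns v.size).length →
      (getGapPatterns v.size).getD i 0 = 2 ^ (i + 2) + 1 := by
    intro i hi
    rw [getGapPatterns_eq] at hi ⊢
    rw [List.length_map, List.length_range] at hi
    rw [List.getD_eq_getElem _ _ (by simpa using hi)]
    simp
  have hlen : v.size ≤ (getGapPatterns v.size).length + 2 := by
    rw [getGapPatterns_eq, List.length_map, List.length_range]
    omega
  rw [hasgapsLoop_iff _ hpat v hlen, hv, pvVal_eq, TFTn_natOf, P3_iff]
  constructor
  · intro h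
    have := h.reverse
    simpa using this
  · intro h
    have := h.reverse
    simpa using this

theorem hasgaps_alt_eq_iff (l : List Bool) :
    hasgaps_alt l = true ↔ List.Sublist [true, false, true] l := by
  unfold hasgaps_alt
  rw [scanGaps_iff]
  simp

-- ===== VERDICT (by name: the statement is the Claim_ definition above) =====
theorem hasgaps_spec : Claim_equal_hasgaps := by
  intro l _
  unfold Spec_hasgaps
  have h1 := hasgaps_eq_iff l
  have h2 := hasgaps_alt_eq_iff l
  cases ha : hasgaps l <;> cases hb : hasgaps_alt l <;> simp_all
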